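-- pv_equiv track=rewrite | github.com/idanshabo/Thesis | significant_split_evaluation/structures/visualize_structures_pipeline.py | get_intervals_from_index
-- ===== SOURCE A (Python) =====
-- def normalize_id(identifier):
--     """
--     Standardizes IDs by replacing typical problem characters.
--     Seq/1 -> Seq_1
--     """
--     return identifier.replace("/", "_")
--
-- def get_intervals_from_index(index, group_a_ids, group_b_ids):
--     set_a = {normalize_id(x) for x in group_a_ids}
--     set_b = {normalize_id(x) for x in group_b_ids}
--     intervals = []
--     if len(index) == 0: return intervals
--
--     first_id = normalize_id(index[0])
--     current_label = "A" if first_id in set_a else ("B" if first_id in set_b else "?")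
--     start_idx = 0
--
--     for i, uid in enumerate(index):
--         nid = normalize_id(uid)
--         label = "A" if nid in set_a else ("B" if nid in set_b else "?")
--         if label != current_label:
--             intervals.append((current_label, start_idx, i))
--             current_label = label
--             start_idx = i
--     intervals.append((current_label, start_idx, len(index)))
--     return intervals
-- ===== SOURCE B (Python) =====
-- def normalize_id(identifier):
--     """
--     Standardizes IDs by replacing typical problem characters.
--     Seq/1 -> Seq_1
--     """
--     return identifier.replace("/", "_")
--
-- def get_intervals_from_index(index, group_a_ids, group_b_ids):
--     set_a = {normalize_id(x) for x in group_a_ids}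
--     set_b = {normalize_id(x) for x in group_b_ids}
--     # pass 1: classify every position
--     labels = ['A' if nid in set_a else ('B' if nid in set_b else '?')
--               for nid in map(normalize_id, index)]
--     # pass 2: group the label list into maximal runs
--     intervals = []
--     n = len(labels)
--     start = 0
--     while start < n:
--         end = start + 1
--         while end < n and labels[end] == labels[start]:
--             end += 1
--         intervals.append((labels[start], start, end))
--         start = end
--     return intervals
-- ===== Notes on version B (the rewrite author's own statement) =====
-- stated objective: alternative
-- what changed: B separates classification from grouping: it first builds a per-position label list, then groups that list into maximal runs with an inner run-length scan and list slicing, instead of A's single boundary-comparison loop carrying (current_label, start_idx) state.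
import Mathlib
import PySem

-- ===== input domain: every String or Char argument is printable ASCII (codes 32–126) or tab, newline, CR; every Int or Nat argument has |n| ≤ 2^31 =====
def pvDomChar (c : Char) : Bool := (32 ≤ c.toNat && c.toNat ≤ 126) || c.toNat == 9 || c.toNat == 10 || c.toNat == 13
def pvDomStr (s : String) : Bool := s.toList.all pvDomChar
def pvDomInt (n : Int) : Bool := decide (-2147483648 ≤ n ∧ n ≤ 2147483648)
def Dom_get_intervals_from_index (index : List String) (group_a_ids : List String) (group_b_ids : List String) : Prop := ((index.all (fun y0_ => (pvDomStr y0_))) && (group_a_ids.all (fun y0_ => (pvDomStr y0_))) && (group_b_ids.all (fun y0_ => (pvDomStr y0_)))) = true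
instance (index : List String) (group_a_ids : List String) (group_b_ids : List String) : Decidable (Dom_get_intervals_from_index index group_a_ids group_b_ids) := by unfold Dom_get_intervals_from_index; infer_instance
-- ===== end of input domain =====

-- B separates classification (a label per position) from run-grouping (an inner run-length
-- scan over the label list) instead of A's single boundary-comparison loop: alternative
-- decomposition, same cost.

-- ===== PORT A =====
-- helper shared by both Pythons: normalize_id
def pvNormalizeId (identifier : String) : String :=
  PySem.Str.replace identifier "/" "_"

-- literal port of A: one fold over enumerate(index) carrying (intervals, current_label, start_idx)
def get_intervals_from_index (index : List String) (group_a_ids : List String) (group_b_ids : List String) : List (String × Int × Int) :=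
  let set_a : PySem.Set String := PySem.Set.ofList (group_a_ids.map pvNormalizeId)
  let set_b : PySem.Set String := PySem.Set.ofList (group_b_ids.map pvNormalizeId)
  match index with
  | [] => []
  | x0 :: _ =>
    let first_id := pvNormalizeId x0
    let current_label : String :=
      if PySem.Set.contains set_a first_id then "A"
      else if PySem.Set.contains set_b first_id then "B" else "?"
    -- state st = (intervals, current_label, start_idx); p = (i, uid)
    let st := (PySem.List.enumerate index 0).foldl
      (fun (st : List (String × Int × Int) × String × Int) (p : Int × String) =>
        let nid := pvNormalizeId p.2
        let label : String :=
          if PySem.Set.contains set_a nid then "A"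
          else if PySem.Set.contains set_b nid then "B" else "?"
        if label ≠ st.2.1 then (st.1 ++ [(st.2.1, st.2.2, p.1)], label, p.1) else st)
      ([], current_label, 0)
    st.1 ++ [(st.2.1, st.2.2, (index.length : Int))]

-- ===== PORT B =====
-- run-grouping pass of Source B, with the not-yet-grouped suffix of labels as the recursion
-- argument: the inner `while end < n and labels[end] == labels[start]` count is the
-- takeWhile length over the suffix's tail, and advancing `start = end` leaves the
-- matching dropWhile as the new suffix
def pvRuns : List String → Int → List (String × Int × Int)
  | [], _ => []
  | head :: tail, start =>
    let k : Int := 1 + ((tail.takeWhile (fun y => y == head)).length : Int)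
    (head, start, start + k) :: pvRuns (tail.dropWhile (fun y => y == head)) (start + k)
termination_by ls _ => ls.length
decreasing_by simpa using Nat.lt_succ_of_le (List.length_dropWhile_le _ _)

def get_intervals_from_index_alt (index : List String) (group_a_ids : List String) (group_b_ids : List String) : List (String × Int × Int) :=
  let set_a : PySem.Set String := PySem.Set.ofList (group_a_ids.map pvNormalizeId)
  let set_b : PySem.Set String := PySem.Set.ofList (group_b_ids.map pvNormalizeId)
  -- pass 1: classify every position
  let labels := index.map (fun x =>
    let nid := pvNormalizeId x
    if PySem.Set.contains set_a nid then "A"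
    else if PySem.Set.contains set_b nid then "B" else "?")
  -- pass 2: group the label list into maximal runs
  pvRuns labels 0

-- ===== PRECONDITION & SPEC =====
def Spec_get_intervals_from_index (index : List String) (group_a_ids : List String) (group_b_ids : List String) (out : List (String × Int × Int)) : Prop := out = get_intervals_from_index_alt index group_a_ids group_b_ids
instance (index : List String) (group_a_ids : List String) (group_b_ids : List String) (out : List (String × Int × Int)) : Decidable (Spec_get_intervals_from_index index group_a_ids group_b_ids out) := by unfold Spec_get_intervals_from_index; infer_instance

-- ===== CLAIM (what is proved, stated in full; the proofs are below) =====
def Claim_equal_get_intervals_from_index : Prop := ∀ (index : List String) (group_a_ids : List String) (group_b_ids : List String), Dom_get_intervals_from_index index group_a_ids group_b_ids → Spec_get_intervals_from_index index group_a_ids group_b_ids (get_intervals_from_index index group_a_ids group_b_ids)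

-- ===== LEMMAS AND PROOFS =====

-- the classification both ports apply, named for the proofs
def pvLabelF (sa sb : PySem.Set String) (x : String) : String :=
  if PySem.Set.contains sa (pvNormalizeId x) then "A"
  else if PySem.Set.contains sb (pvNormalizeId x) then "B" else "?"

-- A's loop, recast as a recursion on the label list: cur is the open run's label,
-- start its start index, i the current position.
def pvRunsC : List String → String → Int → Int → List (String × Int × Int)
  | [], cur, start, i => [(cur, start, i)]
  | l :: rest, cur, start, i =>
    if l = cur then pvRunsC rest cur start (i + 1)
    else (cur, start, i) :: pvRunsC rest l i (i + 1)

-- A's fold (with f the classification) equals pvRunsC on the mapped label list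
theorem pv_foldA_eq (f : String → String) (xs : List String) :
    ∀ (i : Int) (acc : List (String × Int × Int)) (cur : String) (start : Int),
    (let st := (PySem.List.enumerate xs i).foldl
        (fun (st : List (String × Int × Int) × String × Int) (p : Int × String) =>
          if f p.2 ≠ st.2.1 then (st.1 ++ [(st.2.1, st.2.2, p.1)], f p.2, p.1) else st)
        (acc, cur, start);
      st.1 ++ [(st.2.1, st.2.2, i + (xs.length : Int))]) =
    acc ++ pvRunsC (xs.map f) cur start i := by
  induction xs with
  | nil => intro i acc cur start; simp [PySem.List.enumerate, pvRunsC]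
  | cons x rest ih =>
    intro i acc cur start
    rw [PySem.List.enumerate_cons]
    simp only [List.foldl_cons, List.map_cons, List.length_cons, ne_eq]
    by_cases h : f x = cur
    · simp only [h, not_true_eq_false, if_false]
      have hih := ih (i + 1) acc cur start
      simp only [ne_eq] at hih ⊢
      rw [show i + ((rest.length + 1 : Nat) : Int) = i + 1 + (rest.length : Int) by push_cast; ring, hih]
      rw [show pvRunsC (cur :: rest.map f) cur start i = pvRunsC (rest.map f) cur start (i + 1) by
        rw [pvRunsC, if_pos rfl]]
    · simp only [h, not_false_eq_true, if_true]
      have hih := ih (i + 1) (acc ++ [(cur, start, i)]) (f x) i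
      simp only [ne_eq] at hih ⊢
      rw [show i + ((rest.length + 1 : Nat) : Int) = i + 1 + (rest.length : Int) by push_cast; ring, hih]
      rw [show pvRunsC (f x :: rest.map f) cur start i = (cur, start, i) :: pvRunsC (rest.map f) (f x) i (i + 1) by
        rw [pvRunsC, if_neg h], List.append_assoc]
      rfl

-- pvRunsC with an open run of n ≥ 1 copies of cur already consumed equals pvRuns
-- on the label list with those copies put back in front
theorem pv_runsC_eq_runs (ls : List String) :
    ∀ (cur : String) (start : Int) (n : Nat), 1 ≤ n →
    pvRunsC ls cur start (start + n) = pvRuns (List.replicate n cur ++ ls) start := by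
  induction ls with
  | nil =>
    intro cur start n hn
    obtain ⟨m, rfl⟩ : ∃ m, n = m + 1 := ⟨n - 1, by omega⟩
    rw [pvRunsC, List.append_nil, List.replicate_succ, pvRuns]
    have ht : List.takeWhile (fun y => y == cur) (List.replicate m cur) = List.replicate m cur := by simp
    have hd : List.dropWhile (fun y => y == cur) (List.replicate m cur) = [] := by simp
    rw [ht, hd, pvRuns]
    simp only [List.length_replicate, List.cons.injEq, Prod.mk.injEq, and_true, true_and]
    push_cast; ring
  | cons l rest ih =>
    intro cur start n hn
    by_cases h : l = cur
    · subst h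
      rw [pvRunsC, if_pos rfl,
        show List.replicate n l ++ l :: rest = List.replicate (n + 1) l ++ rest by
          simp [List.replicate_succ'],
        show start + (n : Int) + 1 = start + ((n + 1 : Nat) : Int) by push_cast; ring]
      exact ih l start (n + 1) (by omega)
    · rw [pvRunsC, if_neg h]
      obtain ⟨m, rfl⟩ : ∃ m, n = m + 1 := ⟨n - 1, by omega⟩
      have hrhs : pvRuns (List.replicate (m + 1) cur ++ l :: rest) start =
          (cur, start, start + ((m + 1 : Nat) : Int)) :: pvRuns (l :: rest) (start + ((m + 1 : Nat) : Int)) := by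
        rw [show List.replicate (m + 1) cur ++ l :: rest = cur :: (List.replicate m cur ++ l :: rest) by
          simp [List.replicate_succ]]
        rw [pvRuns]
        have ht : List.takeWhile (fun y => y == cur) (List.replicate m cur ++ l :: rest) =
            List.replicate m cur := by simp [h]
        have hd : List.dropWhile (fun y => y == cur) (List.replicate m cur ++ l :: rest) =
            l :: rest := by simp [h]
        rw [ht, hd]
        simp only [List.length_replicate, List.cons.injEq, Prod.mk.injEq, true_and]
        constructor
        · push_cast; ring
        · congr 1; push_cast; ring
      rw [hrhs]
      have hone := ih l (start + ((m + 1 : Nat) : Int)) 1 le_rfl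
      simp only [List.replicate_one, List.singleton_append] at hone
      rw [← hone]
      norm_num

-- the nonempty-index case, stated over arbitrary sets; the verdict theorem instantiates it
theorem pv_main (sa sb : PySem.Set String) (x0 : String) (rest : List String) :
    (let st := (PySem.List.enumerate (x0 :: rest) 0).foldl
        (fun (st : List (String × Int × Int) × String × Int) (p : Int × String) =>
          if pvLabelF sa sb p.2 ≠ st.2.1 then (st.1 ++ [(st.2.1, st.2.2, p.1)], pvLabelF sa sb p.2, p.1) else st)
        ([], pvLabelF sa sb x0, 0);
      st.1 ++ [(st.2.1, st.2.2, (((x0 :: rest).length : Nat) : Int))]) =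
    pvRuns ((x0 :: rest).map (pvLabelF sa sb)) 0 := by
  have hA := pv_foldA_eq (pvLabelF sa sb) (x0 :: rest) 0 [] (pvLabelF sa sb x0) 0
  rw [zero_add] at hA
  rw [hA, List.nil_append, List.map_cons,
    show pvRunsC (pvLabelF sa sb x0 :: rest.map (pvLabelF sa sb)) (pvLabelF sa sb x0) 0 0 =
        pvRunsC (rest.map (pvLabelF sa sb)) (pvLabelF sa sb x0) 0 (0 + 1) by rw [pvRunsC, if_pos rfl],
    show (0 : Int) + 1 = 0 + ((1 : Nat) : Int) by norm_num,
    pv_runsC_eq_runs (rest.map (pvLabelF sa sb)) (pvLabelF sa sb x0) 0 1 le_rfl]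
  rw [List.replicate_one, List.singleton_append]

-- ===== VERDICT (by name: the statement is the Claim_ definition above) =====
theorem get_intervals_from_index_spec : Claim_equal_get_intervals_from_index := by
  intro index group_a_ids group_b_ids _hdom
  unfold Spec_get_intervals_from_index get_intervals_from_index get_intervals_from_index_alt
  cases index with
  | nil => simp [pvRuns]
  | cons x0 rest =>
    exact pv_main (PySem.Set.ofList (group_a_ids.map pvNormalizeId))
      (PySem.Set.ofList (group_b_ids.map pvNormalizeId)) x0 rest
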